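-- pv_equiv track=rewrite | github.com/xianNeuro/helper_functions | xianfunc.py | check_list_thr
-- ===== SOURCE A (Python) =====
-- def check_list_thr(inlist, thr=0,check='neg'):
--     #thr=0, check='neg' (smaller than thr): this checks if a list of numbers had an element that is < 0
--     if check =='neg':
--         out = ['yes' if i>=thr else 'no' for i in inlist]
--     elif check=='pos':
--         out = ['no' if i>thr else 'yes' for i in inlist]
--     if 'no' in out:
--         out = 'yes' #'The list has element of checking'
--     else:
--         out = 'no' #'The list does not have element of checking'
--     return out
-- ===== SOURCE B (Python) =====
-- def check_list_thr(inlist, thr=0, check='neg'):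
--     if check == 'neg':
--         found = bool(inlist) and min(inlist) < thr
--     elif check == 'pos':
--         found = bool(inlist) and max(inlist) > thr
--     return 'yes' if found else 'no'
-- ===== Notes on version B (the rewrite author's own statement) =====
-- stated objective: idiomatic
-- what changed: Replaces the intermediate yes/no label list plus membership test with a single min/max aggregate guarded by an emptiness check.
import Mathlib
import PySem

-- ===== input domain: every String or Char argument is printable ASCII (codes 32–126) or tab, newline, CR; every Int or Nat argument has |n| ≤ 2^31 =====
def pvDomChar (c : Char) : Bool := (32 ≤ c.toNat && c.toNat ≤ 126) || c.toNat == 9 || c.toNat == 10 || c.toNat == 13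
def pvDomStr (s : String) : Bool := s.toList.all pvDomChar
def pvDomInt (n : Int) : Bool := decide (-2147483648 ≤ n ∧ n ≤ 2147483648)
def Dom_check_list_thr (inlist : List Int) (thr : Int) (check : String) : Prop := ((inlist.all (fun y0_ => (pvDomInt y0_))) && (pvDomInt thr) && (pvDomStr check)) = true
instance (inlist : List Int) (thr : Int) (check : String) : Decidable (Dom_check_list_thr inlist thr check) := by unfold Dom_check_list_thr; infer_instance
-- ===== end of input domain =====

-- B replaces A's yes/no label list + membership test with a min/max aggregate; objective: more idiomatic.


-- ===== PORT A =====
def check_list_thr (inlist : List Int) (thr : Int) (check : String) : String :=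
  let out : List String :=
    if check == "neg" then inlist.map (fun i => if thr ≤ i then "yes" else "no")
    else if check == "pos" then inlist.map (fun i => if thr < i then "no" else "yes")
    else []  -- Python raises NameError here ('out' unbound); excluded by Pre_
  if out.contains "no" then "yes" else "no"

-- ===== PORT B =====
def check_list_thr_alt (inlist : List Int) (thr : Int) (check : String) : String :=
  if check == "neg" then
    let found := !inlist.isEmpty &&
      (match PySem.List.min? inlist (fun x => x) with
       | some m => decide (m < thr)
       | none => false)
    if found then "yes" else "no"
  else if check == "pos" then
    let found := !inlist.isEmpty &&
      (match PySem.List.max? inlist (fun x => x) with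
       | some m => decide (thr < m)
       | none => false)
    if found then "yes" else "no"
  else "no"  -- Python raises NameError here ('found' unbound); excluded by Pre_

-- ===== PRECONDITION & SPEC =====
-- Pre_ excludes invalid `check` strings, on which both Pythons raise NameError.
def Pre_check_list_thr (inlist : List Int) (thr : Int) (check : String) : Prop :=
  check = "neg" ∨ check = "pos"
instance (inlist : List Int) (thr : Int) (check : String) : Decidable (Pre_check_list_thr inlist thr check) := by unfold Pre_check_list_thr; infer_instance
def pvWitness_check_list_thr : List Int × Int × String := ([-1, 2], 0, "neg")

def Spec_check_list_thr (inlist : List Int) (thr : Int) (check : String) (out : String) : Prop := out = check_list_thr_alt inlist thr check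
instance (inlist : List Int) (thr : Int) (check : String) (out : String) : Decidable (Spec_check_list_thr inlist thr check out) := by unfold Spec_check_list_thr; infer_instance

-- ===== CLAIM (what is proved, stated in full; the proofs are below) =====
def Claim_equal_check_list_thr : Prop := ∀ (inlist : List Int) (thr : Int) (check : String), Dom_check_list_thr inlist thr check → Pre_check_list_thr inlist thr check → Spec_check_list_thr inlist thr check (check_list_thr inlist thr check)

-- ===== LEMMAS AND PROOFS =====

theorem foldl_min_lt (t : List Int) (x thr : Int) :
    (t.foldl min x < thr) ↔ (x < thr ∨ ∃ i ∈ t, i < thr) := by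
  induction t generalizing x with
  | nil => simp
  | cons y t ih =>
    simp only [List.foldl_cons, ih, min_lt_iff, List.mem_cons]
    aesop

theorem foldl_max_gt (t : List Int) (x thr : Int) :
    (thr < t.foldl max x) ↔ (thr < x ∨ ∃ i ∈ t, thr < i) := by
  induction t generalizing x with
  | nil => simp
  | cons y t ih =>
    simp only [List.foldl_cons, ih, lt_max_iff, List.mem_cons]
    aesop

-- ===== VERDICT (by name: the statement is the Claim_ definition above) =====
theorem check_list_thr_spec : Claim_equal_check_list_thr := by
  intro inlist thr check _ hpre
  unfold Spec_check_list_thr check_list_thr check_list_thr_alt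
  rcases hpre with h | h <;> subst h
  · -- check = "neg"
    cases inlist with
    | nil => simp
    | cons x t =>
      simp only [beq_self_eq_true, if_true, PySem.List.min?_id_cons, List.isEmpty_cons,
        Bool.not_false, Bool.true_and]
      have hc : (List.map (fun i => if thr ≤ i then "yes" else "no") (x :: t)).contains "no"
          = decide (t.foldl min x < thr) := by
        simp only [List.contains_eq_mem, List.mem_map, List.mem_cons, foldl_min_lt,
          decide_eq_decide]
        constructor
        · rintro ⟨i, hi, heq⟩
          by_cases hle : thr ≤ i
          · simp [hle] at heq
          · rcases hi with h | h
            · exact Or.inl (h ▸ (by omega))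
            · exact Or.inr ⟨i, h, by omega⟩
        · rintro (h | ⟨i, hi, h⟩)
          · exact ⟨x, Or.inl rfl, by simp [show ¬ thr ≤ x by omega]⟩
          · exact ⟨i, Or.inr hi, by simp [show ¬ thr ≤ i by omega]⟩
      rw [hc]
  · -- check = "pos"
    cases inlist with
    | nil => simp
    | cons x t =>
      simp only [show ("pos" == "neg") = false from rfl, Bool.false_eq_true, if_false,
        beq_self_eq_true, if_true, PySem.List.max?_id_cons, List.isEmpty_cons,
        Bool.not_false, Bool.true_and]
      have hc : (List.map (fun i => if thr < i then "no" else "yes") (x :: t)).contains "no"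
          = decide (thr < t.foldl max x) := by
        simp only [List.contains_eq_mem, List.mem_map, List.mem_cons, foldl_max_gt,
          decide_eq_decide]
        constructor
        · rintro ⟨i, hi, heq⟩
          by_cases hlt : thr < i
          · rcases hi with h | h
            · exact Or.inl (h ▸ hlt)
            · exact Or.inr ⟨i, h, hlt⟩
          · simp [hlt] at heq
        · rintro (h | ⟨i, hi, h⟩)
          · exact ⟨x, Or.inl rfl, by simp [h]⟩
          · exact ⟨i, Or.inr hi, by simp [h]⟩
      rw [hc]
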